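-- pv_equiv track=rewrite | github.com/satuki-k/gakura_novelcompiler | gakuracompiler.py | split_with_html
-- ===== SOURCE A (Python) =====
-- def split_with_html(text):
-- 	r = []
-- 	l = list(text)
-- 	i = 0
-- 	while i < len(l):
-- 		if l[i] == "\\":
-- 			l[i] = "\\\\"
-- 		if l[i] == "<" and text[i:].find(">") != -1:
-- 			t = [l[i]]
-- 			while l[i] != ">":
-- 				i += 1
-- 				if l[i] == "'":
-- 					l[i] = '"'
-- 				t.append(l[i])
-- 			r.append("".join(t))
-- 		elif l[i] == "&" and text[i:].find(";") != -1:
-- 			t = [l[i]]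
-- 			while l[i] != ";":
-- 				i += 1
-- 				if l[i] == "'":
-- 					l[i] = '"'
-- 				t.append(l[i])
-- 			r.append("".join(t))
-- 		else:
-- 			if l[i] == "'":
-- 				l[i] = "&#39;"
-- 			elif l[i] == '"':
-- 				l[i] = "&#34;"
-- 			r.append(l[i])
-- 		i += 1
-- 	return r
-- ===== SOURCE B (Python) =====
-- def split_with_html(text):
--     out = []
--     esc = {"'": "&#39;", '"': "&#34;", "\\": "\\\\"}
--     i = 0
--     n = len(text)
--     while i < n:
--         c = text[i]
--         j = -1
--         if c == "<":
--             j = text.find(">", i)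
--         elif c == "&":
--             j = text.find(";", i)
--         if j != -1:
--             out.append(text[i:j + 1].replace("'", '"'))
--             i = j + 1
--         else:
--             out.append(esc.get(c, c))
--             i += 1
--     return out
-- ===== Notes on version B (the rewrite author's own statement) =====
-- stated objective: simpler
-- what changed: Replaces A's mutable char-list with nested char-by-char inner while loops by a single index scan that uses str.find to locate each closing delimiter, slices the whole tag/entity out in one step with str.replace for the quote substitution, and maps lone characters through an escape dict.
import Mathlib
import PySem

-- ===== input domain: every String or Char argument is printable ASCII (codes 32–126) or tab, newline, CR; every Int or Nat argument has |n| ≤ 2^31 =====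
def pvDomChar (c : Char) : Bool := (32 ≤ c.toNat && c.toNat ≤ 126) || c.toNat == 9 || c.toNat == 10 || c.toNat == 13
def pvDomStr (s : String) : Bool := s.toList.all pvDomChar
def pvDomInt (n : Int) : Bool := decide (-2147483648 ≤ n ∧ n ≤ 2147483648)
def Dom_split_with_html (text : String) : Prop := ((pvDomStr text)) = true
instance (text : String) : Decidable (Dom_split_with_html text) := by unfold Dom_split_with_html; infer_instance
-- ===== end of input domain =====

-- B replaces A's mutable char-list with nested inner while loops by a single scan that slices
-- each tag/entity out in one step; objective: simpler. Proved equal on all of Dom (no Pre_ needed).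

-- ===== PORT A =====
-- A walks a mutable list `l` of one-character strings with index i; ported with the same state
-- (t, l, i) / (r, l, i).  `text[i:].find(">") != -1` is ported exactly as '>' ∈ text.toList.drop i
-- (find = -1 iff the character is absent from the suffix).  The fuel argument only makes the
-- while-loops total; A's guards ensure it never runs out on the executed paths.
def pvInnerA : Nat → String → List String → List String → Nat → (List String × List String × Nat)
  | 0, _, t, l, i => (t, l, i)
  | fuel+1, stop, t, l, i =>
    if l.getD i "" = stop then (t, l, i)
    else
      let i' := i + 1
      let l' := if l.getD i' "" = "'" then l.set i' "\"" else l
      pvInnerA fuel stop (t ++ [l'.getD i' ""]) l' i'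

def pvOuterA : Nat → List String → List String → List Char → Nat → List String
  | 0, r, _, _, _ => r
  | fuel+1, r, l, text, i =>
    if i < l.length then
      let l1 := if l.getD i "" = "\\" then l.set i "\\\\" else l
      if l1.getD i "" = "<" ∧ '>' ∈ text.drop i then
        match pvInnerA (fuel+1) ">" [l1.getD i ""] l1 i with
        | (t, l2, i2) => pvOuterA fuel (r ++ [PySem.Str.join "" t]) l2 text (i2 + 1)
      else if l1.getD i "" = "&" ∧ ';' ∈ text.drop i then
        match pvInnerA (fuel+1) ";" [l1.getD i ""] l1 i with
        | (t, l2, i2) => pvOuterA fuel (r ++ [PySem.Str.join "" t]) l2 text (i2 + 1)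
      else
        let c := l1.getD i ""
        let c := if c = "'" then "&#39;" else if c = "\"" then "&#34;" else c
        pvOuterA fuel (r ++ [c]) l1 text (i + 1)
    else r

def split_with_html (text : String) : List String :=
  pvOuterA (text.toList.length + 1) [] (text.toList.map (fun c => String.ofList [c])) text.toList 0

-- ===== PORT B =====
-- Source B scans by index, locating the closing '>'/';' with text.find(stop, i) and slicing
-- text[i:j+1]; find+slice is ported structurally as takeWhile/dropWhile on the remaining
-- characters, `.replace("'", '"')` as a map of pvQc (exact: the pattern is a single char),
-- and esc.get(c, c) as the literal three-key lookup chain (exact for a three-key literal dict).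
def pvQc (c : Char) : Char := if c = '\'' then '"' else c

def pvEsc (c : Char) : String :=
  if c = '\'' then "&#39;" else if c = '"' then "&#34;" else if c = '\\' then "\\\\"
  else String.ofList [c]

def pvScanB : List Char → List String
  | [] => []
  | c :: cs =>
    if c = '<' ∧ '>' ∈ cs then
      String.ofList ((c :: (cs.takeWhile (· ≠ '>') ++ ['>'])).map pvQc)
        :: pvScanB ((cs.dropWhile (· ≠ '>')).drop 1)
    else if c = '&' ∧ ';' ∈ cs then
      String.ofList ((c :: (cs.takeWhile (· ≠ ';') ++ [';'])).map pvQc)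
        :: pvScanB ((cs.dropWhile (· ≠ ';')).drop 1)
    else
      pvEsc c :: pvScanB cs
  termination_by cs => cs.length
  decreasing_by
  · have h1 := List.length_dropWhile_le (· ≠ '>') cs
    have h2 : ((cs.dropWhile (· ≠ '>')).drop 1).length ≤ (cs.dropWhile (· ≠ '>')).length := by simp
    simp only [List.length_cons]; omega
  · have h1 := List.length_dropWhile_le (· ≠ ';') cs
    have h2 : ((cs.dropWhile (· ≠ ';')).drop 1).length ≤ (cs.dropWhile (· ≠ ';')).length := by simp
    simp only [List.length_cons]; omega
  · simp

def split_with_html_alt (text : String) : List String := pvScanB text.toList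

-- ===== PRECONDITION & SPEC =====
def Spec_split_with_html (text : String) (out : List String) : Prop := out = split_with_html_alt text
instance (text : String) (out : List String) : Decidable (Spec_split_with_html text out) := by unfold Spec_split_with_html; infer_instance

-- ===== CLAIM (what is proved, stated in full; the proofs are below) =====
def Claim_equal_split_with_html : Prop := ∀ (text : String), Dom_split_with_html text → Spec_split_with_html text (split_with_html text)

-- ===== LEMMAS AND PROOFS =====

lemma pv_getD_of_drop {α : Type} (l : List α) (i : Nat) (x d : α) (xs : List α)
    (h : l.drop i = x :: xs) : l.getD i d = x := by
  have h0 : (l.drop i)[0]? = some x := by simp [h]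
  rw [List.getElem?_drop] at h0
  simp only [Nat.add_zero] at h0
  simp [List.getD_eq_getElem?_getD, h0]

-- "".join of a list of one-character strings is the string of those characters
lemma pv_join_singletons : ∀ cs : List Char,
    PySem.Str.join "" (cs.map (fun c => String.ofList [c])) = String.ofList cs := by
  intro cs
  induction cs with
  | nil => decide
  | cons c cs ih =>
    apply String.toList_inj.mp
    have ihl := congrArg String.toList ih
    simp [pysem] at ihl ⊢
    cases cs <;> simp_all [List.intercalate, PySem.Chars.join]

lemma pv_dropWhile_mem (a : Char) : ∀ cs : List Char, a ∈ cs →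
    cs.dropWhile (· ≠ a) = a :: (cs.dropWhile (· ≠ a)).drop 1 := by
  intro cs
  induction cs with
  | nil => simp
  | cons c cs ih =>
    intro h
    by_cases hc : c = a
    · subst hc
      rw [List.dropWhile_cons_of_neg (by simp)]
      simp
    · rw [List.dropWhile_cons_of_pos (by simp [hc])]
      exact ih ((List.mem_cons.mp h).resolve_left (fun e => hc e.symm))

-- the inner while-loop of A, characterised on the suffix pre ++ s :: post
lemma pv_innerA_spec (s : Char) (hs : s = '>' ∨ s = ';') :
    ∀ (pre : List Char) (post : List Char) (t l : List String) (i fuel : Nat),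
    (∀ c ∈ pre, c ≠ s) →
    l.drop (i+1) = (pre ++ s :: post).map (fun c => String.ofList [c]) →
    l.getD i "" ≠ String.ofList [s] →
    pre.length + 2 ≤ fuel →
    ∃ l', pvInnerA fuel (String.ofList [s]) t l i
        = (t ++ pre.map (fun c => String.ofList [pvQc c]) ++ [String.ofList [s]], l', i + pre.length + 1)
      ∧ l'.drop (i + pre.length + 2) = post.map (fun c => String.ofList [c])
      ∧ l'.length = l.length := by
  intro pre
  induction pre with
  | nil =>
    intro post t l i fuel _ hdrop hget hfuel
    match fuel, hfuel with
    | f + 2, _ =>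
      have hget1 : l.getD (i+1) "" = String.ofList [s] :=
        pv_getD_of_drop l (i+1) _ "" _ (by simpa using hdrop)
      have hnq : String.ofList [s] ≠ "'" := by rcases hs with h | h <;> subst h <;> decide
      refine ⟨l, ?_, ?_, rfl⟩
      · simp only [pvInnerA, if_neg hget, hget1, if_neg hnq]
        simp
      · have := congrArg (List.drop 1) hdrop
        simpa [List.drop_drop] using this
  | cons c pre' ih =>
    intro post t l i fuel hpre hdrop hget hfuel
    match fuel, hfuel with
    | f + 1, hf =>
      have hcs : c ≠ s := hpre c (by simp)
      have hdrop1 : l.drop (i+1)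
          = String.ofList [c] :: ((pre' ++ s :: post).map (fun c => String.ofList [c])) := by
        simpa using hdrop
      have hget1 : l.getD (i+1) "" = String.ofList [c] :=
        pv_getD_of_drop l (i+1) _ "" _ hdrop1
      have hlen1 : i + 1 < l.length := by
        by_contra hnot
        have : l.drop (i+1) = [] := List.drop_eq_nil_of_le (by omega)
        simp [this] at hdrop1
      -- the (possibly) updated list after the quote substitution
      by_cases hq : c = '\''
      · subst hq
        have hquote : l.getD (i+1) "" = "'" := by rw [hget1]
        have hsetdrop : (l.set (i+1) "\"").drop (i+1)
            = String.ofList ['"'] :: ((pre' ++ s :: post).map (fun c => String.ofList [c])) := by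
          rw [List.drop_set, if_neg (by omega : ¬ (i+1 < i+1)), hdrop1]
          simp
        have hgetset : (l.set (i+1) "\"").getD (i+1) "" = String.ofList ['"'] :=
          pv_getD_of_drop _ _ _ _ _ hsetdrop
        have hstep : pvInnerA (f+1) (String.ofList [s]) t l i
            = pvInnerA f (String.ofList [s]) (t ++ [String.ofList ['"']]) (l.set (i+1) "\"") (i+1) := by
          simp only [pvInnerA]
          rw [if_neg hget, if_pos hquote, hgetset]
        obtain ⟨l'', he, hd, hl⟩ := ih post (t ++ [String.ofList ['"']]) (l.set (i+1) "\"") (i+1) f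
          (fun c hc => hpre c (List.mem_cons_of_mem _ hc))
          (by
            have := congrArg (List.drop 1) hsetdrop
            simpa [List.drop_drop] using this)
          (by
            rw [hgetset]
            rcases hs with h | h <;> subst h <;> decide)
          (by simp only [List.length_cons] at hf; omega)
        refine ⟨l'', ?_, ?_, ?_⟩
        · rw [hstep, he]
          simp [pvQc]
          omega
        · have : i + ('\'' :: pre').length + 2 = (i+1) + pre'.length + 2 := by simp; omega
          rw [this]; exact hd
        · simpa using hl
      · have hnotq : ¬ (l.getD (i+1) "" = "'") := by
          rw [hget1]
          intro h
          exact hq (by simpa using String.ofList_inj.mp h)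
        have hstep : pvInnerA (f+1) (String.ofList [s]) t l i
            = pvInnerA f (String.ofList [s]) (t ++ [String.ofList [c]]) l (i+1) := by
          simp only [pvInnerA]
          rw [if_neg hget, if_neg hnotq, hget1]
        obtain ⟨l'', he, hd, hl⟩ := ih post (t ++ [String.ofList [c]]) l (i+1) f
          (fun c hc => hpre c (List.mem_cons_of_mem _ hc))
          (by
            have := congrArg (List.drop 1) hdrop1
            simpa [List.drop_drop] using this)
          (by
            rw [hget1]
            intro h
            exact hcs (by simpa using String.ofList_inj.mp h))
          (by simp only [List.length_cons] at hf; omega)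
        refine ⟨l'', ?_, ?_, ?_⟩
        · rw [hstep, he]
          simp [pvQc, hq]
          omega
        · have : i + (c :: pre').length + 2 = (i+1) + pre'.length + 2 := by simp; omega
          rw [this]; exact hd
        · exact hl

lemma pv_outerA_spec : ∀ (fuel : Nat) (cs : List Char) (r l : List String) (tcs : List Char) (i : Nat),
    tcs.drop i = cs →
    l.drop i = cs.map (fun c => String.ofList [c]) →
    l.length = i + cs.length →
    cs.length + 1 ≤ fuel →
    pvOuterA fuel r l tcs i = r ++ pvScanB cs := by
  intro fuel
  induction fuel with
  | zero => intro cs _ _ _ _ _ _ _ hfuel; omega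
  | succ f ihf =>
    intro cs r l tcs i htext hdrop hlen hfuel
    cases cs with
    | nil =>
      have hni : ¬ i < l.length := by simp at hlen; omega
      simp only [pvOuterA]
      rw [if_neg hni]
      simp [pvScanB]
    | cons c cs' =>
      have hlt : i < l.length := by simp only [List.length_cons] at hlen; omega
      have hgetl : l.getD i "" = String.ofList [c] :=
        pv_getD_of_drop _ _ _ _ _ (by simpa using hdrop)
      have hdrop1 : l.drop (i+1) = cs'.map (fun c => String.ofList [c]) := by
        have := congrArg (List.drop 1) hdrop
        simpa [List.drop_drop] using this
      have htext1 : tcs.drop (i+1) = cs' := by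
        have := congrArg (List.drop 1) htext
        simpa [List.drop_drop] using this
      by_cases hbs : c = '\\'
      · -- backslash: replaced in place by "\\\\", then the plain-character branch
        subst hbs
        have hsetdrop : (l.set i "\\\\").drop i
            = "\\\\" :: cs'.map (fun c => String.ofList [c]) := by
          rw [List.drop_set, if_neg (by omega : ¬ i < i)]
          have hdc : l.drop i = String.ofList ['\\'] :: cs'.map (fun c => String.ofList [c]) := by
            simpa using hdrop
          rw [hdc]
          simp
        have hget1 : (l.set i "\\\\").getD i "" = "\\\\" :=
          pv_getD_of_drop _ _ _ _ _ hsetdrop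
        have hstep : pvOuterA (f+1) r l tcs i
            = pvOuterA f (r ++ ["\\\\"]) (l.set i "\\\\") tcs (i + 1) := by
          simp only [pvOuterA]
          rw [if_pos hlt, if_pos (by rw [hgetl] : l.getD i "" = "\\"), hget1]
          rw [if_neg (fun h => absurd h.1 (by decide : ¬ ("\\\\" : String) = "<"))]
          rw [if_neg (fun h => absurd h.1 (by decide : ¬ ("\\\\" : String) = "&"))]
          rw [if_neg (by decide : ¬ ("\\\\" : String) = "'")]
          rw [if_neg (by decide : ¬ ("\\\\" : String) = "\"")]
        rw [hstep]
        rw [ihf cs' (r ++ ["\\\\"]) (l.set i "\\\\") tcs (i+1) htext1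
          (by rw [List.drop_set, if_pos (by omega : i < i + 1)]; exact hdrop1)
          (by simp only [List.length_set]; simp only [List.length_cons] at hlen; omega)
          (by simp only [List.length_cons] at hfuel; omega)]
        have : pvScanB ('\\' :: cs') = "\\\\" :: pvScanB cs' := by
          rw [pvScanB, if_neg (fun h => absurd h.1 (by decide)),
            if_neg (fun h => absurd h.1 (by decide))]
          rfl
        rw [this]
        simp
      · have hcond0 : ¬ (l.getD i "" = "\\") := by
          rw [hgetl]
          intro h
          exact hbs (by simpa using String.ofList_inj.mp h)
        by_cases htag : c = '<' ∧ '>' ∈ cs'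
        · -- tag branch: c = '<' and '>' occurs in cs'
          obtain ⟨hc, hmem⟩ := htag
          subst hc
          have hsplit := pv_dropWhile_mem '>' cs' hmem
          have hdecomp : cs' = cs'.takeWhile (· ≠ '>') ++ '>' :: (cs'.dropWhile (· ≠ '>')).drop 1 := by
            conv_lhs => rw [← List.takeWhile_append_dropWhile (p := (· ≠ '>')) (l := cs'), hsplit]
          set pre := cs'.takeWhile (· ≠ '>') with hpre_def
          set post := (cs'.dropWhile (· ≠ '>')).drop 1 with hpost_def
          have hlens : pre.length + 1 + post.length = cs'.length := by
            have := congrArg List.length hdecomp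
            simp at this
            omega
          obtain ⟨l2, he, hd2, hl2⟩ :=
            pv_innerA_spec '>' (by simp) pre post [String.ofList ['<']] l i (f+1)
              (fun x hx => by simpa using List.mem_takeWhile_imp hx)
              (by rw [hdrop1, ← hdecomp])
              (by rw [hgetl]; decide)
              (by simp only [List.length_cons] at hfuel; omega)
          have hjoin : PySem.Str.join ""
                ([String.ofList ['<']] ++ pre.map (fun c => String.ofList [pvQc c]) ++ [String.ofList ['>']])
              = String.ofList ('<' :: (pre.map pvQc ++ ['>'])) := by
            rw [← pv_join_singletons ('<' :: (pre.map pvQc ++ ['>']))]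
            simp [Function.comp_def]
          have hstep : pvOuterA (f+1) r l tcs i
              = pvOuterA f (r ++ [String.ofList ('<' :: (pre.map pvQc ++ ['>']))]) l2 tcs (i + pre.length + 2) := by
            simp only [pvOuterA]
            rw [if_pos hlt, if_neg hcond0, if_pos ⟨by rw [hgetl], by rw [htext]; exact List.mem_cons_of_mem _ hmem⟩]
            rw [hgetl]
            rw [show (">" : String) = String.ofList ['>'] from rfl, he, hjoin]
          have htail : pvOuterA f (r ++ [String.ofList ('<' :: (pre.map pvQc ++ ['>']))]) l2 tcs (i + pre.length + 2)
              = (r ++ [String.ofList ('<' :: (pre.map pvQc ++ ['>']))]) ++ pvScanB post := by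
            apply ihf
            · rw [show i + pre.length + 2 = i + (pre.length + 1 + 1) from by omega, ← List.drop_drop,
                htext, hdecomp, List.drop_succ_cons, ← List.drop_drop, List.drop_left]
              simp
            · exact hd2
            · rw [hl2, hlen]
              simp only [List.length_cons]
              omega
            · simp only [List.length_cons] at hfuel
              omega
          have hscan : pvScanB ('<' :: cs')
              = String.ofList ('<' :: (pre.map pvQc ++ ['>'])) :: pvScanB post := by
            rw [pvScanB, if_pos ⟨rfl, hmem⟩, ← hpre_def, ← hpost_def]
            congr 1
            exact congrArg String.ofList (by simp [pvQc])
          rw [hstep, htail, hscan]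
          simp
        · by_cases hent : c = '&' ∧ ';' ∈ cs'
          · -- entity branch: c = '&' and ';' occurs in cs'
            obtain ⟨hc, hmem⟩ := hent
            subst hc
            have hsplit := pv_dropWhile_mem ';' cs' hmem
            have hdecomp : cs' = cs'.takeWhile (· ≠ ';') ++ ';' :: (cs'.dropWhile (· ≠ ';')).drop 1 := by
              conv_lhs => rw [← List.takeWhile_append_dropWhile (p := (· ≠ ';')) (l := cs'), hsplit]
            set pre := cs'.takeWhile (· ≠ ';') with hpre_def
            set post := (cs'.dropWhile (· ≠ ';')).drop 1 with hpost_def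
            have hlens : pre.length + 1 + post.length = cs'.length := by
              have := congrArg List.length hdecomp
              simp at this
              omega
            obtain ⟨l2, he, hd2, hl2⟩ :=
              pv_innerA_spec ';' (by simp) pre post [String.ofList ['&']] l i (f+1)
                (fun x hx => by simpa using List.mem_takeWhile_imp hx)
                (by rw [hdrop1, ← hdecomp])
                (by rw [hgetl]; decide)
                (by simp only [List.length_cons] at hfuel; omega)
            have hjoin : PySem.Str.join ""
                  ([String.ofList ['&']] ++ pre.map (fun c => String.ofList [pvQc c]) ++ [String.ofList [';']])
                = String.ofList ('&' :: (pre.map pvQc ++ [';'])) := by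
              rw [← pv_join_singletons ('&' :: (pre.map pvQc ++ [';']))]
              simp [Function.comp_def]
            have hstep : pvOuterA (f+1) r l tcs i
                = pvOuterA f (r ++ [String.ofList ('&' :: (pre.map pvQc ++ [';']))]) l2 tcs (i + pre.length + 2) := by
              simp only [pvOuterA]
              rw [if_pos hlt, if_neg hcond0, if_neg (fun hco => by rw [hgetl] at hco; exact absurd (String.ofList_inj.mp hco.1) (by decide)), if_pos ⟨by rw [hgetl], by rw [htext]; exact List.mem_cons_of_mem _ hmem⟩]
              rw [hgetl]
              rw [show (";" : String) = String.ofList [';'] from rfl, he, hjoin]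
            have htail : pvOuterA f (r ++ [String.ofList ('&' :: (pre.map pvQc ++ [';']))]) l2 tcs (i + pre.length + 2)
                = (r ++ [String.ofList ('&' :: (pre.map pvQc ++ [';']))]) ++ pvScanB post := by
              apply ihf
              · rw [show i + pre.length + 2 = i + (pre.length + 1 + 1) from by omega, ← List.drop_drop,
                htext, hdecomp, List.drop_succ_cons, ← List.drop_drop, List.drop_left]
                simp
              · exact hd2
              · rw [hl2, hlen]
                simp only [List.length_cons]
                omega
              · simp only [List.length_cons] at hfuel
                omega
            have hscan : pvScanB ('&' :: cs')
                = String.ofList ('&' :: (pre.map pvQc ++ [';'])) :: pvScanB post := by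
              rw [pvScanB, if_neg (fun h => absurd h.1 (by decide)), if_pos ⟨rfl, hmem⟩,
                ← hpre_def, ← hpost_def]
              congr 1
              exact congrArg String.ofList (by simp [pvQc])
            rw [hstep, htail, hscan]
            simp
          · -- plain character
            have hA1 : ¬ (l.getD i "" = "<" ∧ '>' ∈ tcs.drop i) := by
              rintro ⟨h1, h2⟩
              rw [hgetl] at h1
              have hc : c = '<' := by simpa using String.ofList_inj.mp h1
              subst hc
              rw [htext] at h2
              exact htag ⟨rfl, (List.mem_cons.mp h2).resolve_left (by decide)⟩
            have hA2 : ¬ (l.getD i "" = "&" ∧ ';' ∈ tcs.drop i) := by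
              rintro ⟨h1, h2⟩
              rw [hgetl] at h1
              have hc : c = '&' := by simpa using String.ofList_inj.mp h1
              subst hc
              rw [htext] at h2
              exact hent ⟨rfl, (List.mem_cons.mp h2).resolve_left (by decide)⟩
            have hstep : pvOuterA (f+1) r l tcs i
                = pvOuterA f (r ++ [pvEsc c]) l tcs (i + 1) := by
              simp only [pvOuterA]
              rw [if_pos hlt, if_neg hcond0, if_neg hA1, if_neg hA2, hgetl]
              congr 2
              by_cases h1 : c = '\''
              · subst h1; rfl
              · rw [if_neg (fun h => h1 (by simpa using String.ofList_inj.mp h))]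
                by_cases h2 : c = '"'
                · subst h2; rfl
                · rw [if_neg (fun h => h2 (by simpa using String.ofList_inj.mp h))]
                  simp [pvEsc, h1, h2, hbs]
            rw [hstep]
            rw [ihf cs' (r ++ [pvEsc c]) l tcs (i+1) htext1 hdrop1
              (by simp only [List.length_cons] at hlen; omega)
              (by simp only [List.length_cons] at hfuel; omega)]
            have : pvScanB (c :: cs') = pvEsc c :: pvScanB cs' := by
              rw [pvScanB, if_neg htag, if_neg hent]
            rw [this]
            simp

-- ===== VERDICT (by name: the statement is the Claim_ definition above) =====
theorem split_with_html_spec : Claim_equal_split_with_html := by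
  intro text _
  unfold Spec_split_with_html split_with_html split_with_html_alt
  have := pv_outerA_spec (text.toList.length + 1) text.toList []
      (text.toList.map (fun c => String.ofList [c])) text.toList 0
      (by simp) (by simp) (by simp) (by omega)
  simpa using this
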